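-- pv_equiv track=rewrite | github.com/fjkiani/crispro-frontend-v2 | scripts/mm/mine_mm_diamond_features.py | get_mm_resistance_labels
-- ===== SOURCE A (Python) =====
-- from typing import Dict, List, Any
--
-- def get_mm_resistance_labels(patient_data: Dict[str, Any]) -> Dict[str, bool]:
--     """Determine MM resistance labels for a patient."""
--     labels = {
--         "PI_RESISTANT": False,
--         "IMID_RESISTANT": False,
--         "UNIVERSAL_RESISTANT": False,
--         "PI_SENSITIVE": False,
--         "IMID_SENSITIVE": False,
--     }
--
--     mutations = patient_data.get("mutations", [])
--     has_psmb5 = any(m.get("gene") == "PSMB5" for m in mutations)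
--     has_crbn = any(m.get("gene") == "CRBN" for m in mutations)
--     has_tp53 = any(m.get("gene") == "TP53" for m in mutations)
--
--     if has_psmb5:
--         labels["PI_RESISTANT"] = True
--     if has_crbn:
--         labels["IMID_RESISTANT"] = True
--     if has_tp53:
--         labels["UNIVERSAL_RESISTANT"] = True
--
--     if not labels["PI_RESISTANT"] and not labels["IMID_RESISTANT"]:
--         labels["PI_SENSITIVE"] = True
--         labels["IMID_SENSITIVE"] = True
--
--     return labels
-- ===== SOURCE B (Python) =====
-- def get_mm_resistance_labels(patient_data):
--     """Determine MM resistance labels for a patient.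
--
--     Single pass over the mutations with a three-flag accumulator and an
--     early break once all three marker genes have been seen.
--     """
--     pi = imid = uni = False
--     for m in patient_data.get("mutations", []):
--         g = m.get("gene")
--         if g == "PSMB5":
--             pi = True
--         elif g == "CRBN":
--             imid = True
--         elif g == "TP53":
--             uni = True
--         if pi and imid and uni:
--             break
--     sens = not pi and not imid
--     return {
--         "PI_RESISTANT": pi,
--         "IMID_RESISTANT": imid,
--         "UNIVERSAL_RESISTANT": uni,
--         "PI_SENSITIVE": sens,
--         "IMID_SENSITIVE": sens,
--     }
-- ===== Notes on version B (the rewrite author's own statement) =====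
-- stated objective: alternative
-- what changed: A makes three separate any-scans over the mutations and then conditionally mutates a pre-built dict; B makes one loop carrying three boolean accumulators updated by an if/elif dispatch per mutation, breaking early once all three marker genes are found, and returns the labels as a single dict literal.
import Mathlib
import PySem

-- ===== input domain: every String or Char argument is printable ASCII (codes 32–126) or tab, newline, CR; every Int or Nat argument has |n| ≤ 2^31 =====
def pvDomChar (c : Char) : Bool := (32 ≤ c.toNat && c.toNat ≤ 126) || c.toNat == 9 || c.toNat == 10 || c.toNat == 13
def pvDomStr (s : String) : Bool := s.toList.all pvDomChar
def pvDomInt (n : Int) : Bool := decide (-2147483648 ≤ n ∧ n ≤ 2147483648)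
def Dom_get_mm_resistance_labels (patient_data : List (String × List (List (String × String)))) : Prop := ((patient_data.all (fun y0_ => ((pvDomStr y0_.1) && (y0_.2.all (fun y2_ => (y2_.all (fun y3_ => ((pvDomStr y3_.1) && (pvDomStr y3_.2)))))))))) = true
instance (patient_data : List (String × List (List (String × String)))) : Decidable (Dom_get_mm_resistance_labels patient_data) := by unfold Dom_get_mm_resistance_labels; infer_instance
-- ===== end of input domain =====

-- B replaces A's three separate any-scans plus in-place dict updates with one accumulator
-- loop (if/elif dispatch, early break when all three genes are found) and a single dict
-- literal (alternative decomposition, same O(n) cost).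
-- ===== PORT A =====
def get_mm_resistance_labels (patient_data : List (String × List (List (String × String)))) : List (String × Bool) :=
  let labels : PySem.Dict String Bool := PySem.Dict.ofList
    [("PI_RESISTANT", false), ("IMID_RESISTANT", false), ("UNIVERSAL_RESISTANT", false),
     ("PI_SENSITIVE", false), ("IMID_SENSITIVE", false)]
  let mutations := PySem.Dict.getD (PySem.Dict.mk patient_data) "mutations" []
  let has_psmb5 := mutations.any (fun m => (PySem.Dict.mk m).get? "gene" == some "PSMB5")
  let has_crbn := mutations.any (fun m => (PySem.Dict.mk m).get? "gene" == some "CRBN")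
  let has_tp53 := mutations.any (fun m => (PySem.Dict.mk m).get? "gene" == some "TP53")
  let labels := if has_psmb5 then labels.insert "PI_RESISTANT" true else labels
  let labels := if has_crbn then labels.insert "IMID_RESISTANT" true else labels
  let labels := if has_tp53 then labels.insert "UNIVERSAL_RESISTANT" true else labels
  let labels :=
    if !(labels.getD "PI_RESISTANT" false) && !(labels.getD "IMID_RESISTANT" false) then
      (labels.insert "PI_SENSITIVE" true).insert "IMID_SENSITIVE" true
    else labels
  labels.items

-- ===== PORT B =====
-- the for-loop of Source B: three boolean accumulators, if/elif dispatch, early break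
def pvAltLoop : List (List (String × String)) → Bool → Bool → Bool → Bool × Bool × Bool
  | [], pi, imid, uni => (pi, imid, uni)
  | m :: rest, pi, imid, uni =>
    let g := (PySem.Dict.mk m).get? "gene"
    let s := if g == some "PSMB5" then (true, imid, uni)
             else if g == some "CRBN" then (pi, true, uni)
             else if g == some "TP53" then (pi, imid, true)
             else (pi, imid, uni)
    if s.1 && s.2.1 && s.2.2 then s else pvAltLoop rest s.1 s.2.1 s.2.2

def get_mm_resistance_labels_alt (patient_data : List (String × List (List (String × String)))) : List (String × Bool) :=
  let r := pvAltLoop (PySem.Dict.getD (PySem.Dict.mk patient_data) "mutations" []) false false false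
  let sens := !r.1 && !r.2.1
  [("PI_RESISTANT", r.1), ("IMID_RESISTANT", r.2.1), ("UNIVERSAL_RESISTANT", r.2.2),
   ("PI_SENSITIVE", sens), ("IMID_SENSITIVE", sens)]

-- ===== PRECONDITION & SPEC =====
def Spec_get_mm_resistance_labels (patient_data : List (String × List (List (String × String)))) (out : List (String × Bool)) : Prop := out = get_mm_resistance_labels_alt patient_data
instance (patient_data : List (String × List (List (String × String)))) (out : List (String × Bool)) : Decidable (Spec_get_mm_resistance_labels patient_data out) := by unfold Spec_get_mm_resistance_labels; infer_instance

-- ===== CLAIM =====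
def Claim_equal_get_mm_resistance_labels : Prop := ∀ (patient_data : List (String × List (List (String × String)))), Dom_get_mm_resistance_labels patient_data → Spec_get_mm_resistance_labels patient_data (get_mm_resistance_labels patient_data)

-- ===== LEMMAS AND PROOFS =====
-- the accumulator loop computes (acc ∨ some gene is PSMB5, acc ∨ … CRBN, acc ∨ … TP53)
lemma pvAltLoop_eq_any (l : List (List (String × String))) (p i u : Bool) :
    pvAltLoop l p i u =
      (p || l.any (fun m => (PySem.Dict.mk m).get? "gene" == some "PSMB5"),
       i || l.any (fun m => (PySem.Dict.mk m).get? "gene" == some "CRBN"),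
       u || l.any (fun m => (PySem.Dict.mk m).get? "gene" == some "TP53")) := by
  induction l generalizing p i u with
  | nil => simp [pvAltLoop]
  | cons m rest ih =>
    simp only [pvAltLoop, List.any_cons]
    by_cases h1 : ((PySem.Dict.mk m).get? "gene" == some "PSMB5") = true
    · have h2 : ((PySem.Dict.mk m).get? "gene" == some "CRBN") = false := by simp_all
      have h3 : ((PySem.Dict.mk m).get? "gene" == some "TP53") = false := by simp_all
      cases p <;> cases i <;> cases u <;> simp [h1, h2, h3, ih]
    · by_cases h2 : ((PySem.Dict.mk m).get? "gene" == some "CRBN") = true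
      · have h3 : ((PySem.Dict.mk m).get? "gene" == some "TP53") = false := by simp_all
        simp only [Bool.not_eq_true] at h1
        cases p <;> cases i <;> cases u <;> simp [h1, h2, h3, ih]
      · by_cases h3 : ((PySem.Dict.mk m).get? "gene" == some "TP53") = true
        · simp only [Bool.not_eq_true] at h1 h2
          cases p <;> cases i <;> cases u <;> simp [h1, h2, h3, ih]
        · simp only [Bool.not_eq_true] at h1 h2 h3
          cases p <;> cases i <;> cases u <;> simp [h1, h2, h3, ih]

-- ===== VERDICT =====
theorem get_mm_resistance_labels_spec : Claim_equal_get_mm_resistance_labels := by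
  intro pd _
  unfold Spec_get_mm_resistance_labels get_mm_resistance_labels get_mm_resistance_labels_alt
  simp only [pvAltLoop_eq_any, Bool.false_or]
  cases hp : (PySem.Dict.getD (PySem.Dict.mk pd) "mutations" []).any
      (fun m => (PySem.Dict.mk m).get? "gene" == some "PSMB5") <;>
  cases hc : (PySem.Dict.getD (PySem.Dict.mk pd) "mutations" []).any
      (fun m => (PySem.Dict.mk m).get? "gene" == some "CRBN") <;>
  cases ht : (PySem.Dict.getD (PySem.Dict.mk pd) "mutations" []).any
      (fun m => (PySem.Dict.mk m).get? "gene" == some "TP53") <;>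
  rfl
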